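-- pv_equiv track=rewrite | github.com/nivedithaks05/Worknest-Updates | backend/api/services/ai_engine.py | _normalize_tokens
-- ===== SOURCE A (Python) =====
-- from typing import List, Dict, Any
--
-- def _normalize_tokens(values: List[str]) -> List[str]:
--   tokens: List[str] = []
--   for v in values:
--     for part in v.split(","):
--       token = part.strip().lower()
--       if token:
--         tokens.append(token)
--   return tokens
-- ===== SOURCE B (Python) =====
-- from typing import List
--
-- def _normalize_tokens(values: List[str]) -> List[str]:
--   # single character-level scan: a state machine with a token buffer and a
--   # pending-whitespace run, instead of split/strip/lower on each piece
--   tokens: List[str] = []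
--   for v in values:
--     buf = ""
--     pending = ""
--     for ch in v:
--       if ch == ",":
--         if buf:
--           tokens.append(buf)
--         buf = ""
--         pending = ""
--       elif ch.isspace():
--         if buf:
--           pending += ch
--       else:
--         buf += pending + ch.lower()
--         pending = ""
--     if buf:
--       tokens.append(buf)
--   return tokens
-- ===== Notes on version B (the rewrite author's own statement) =====
-- stated objective: alternative
-- what changed: B replaces A's split-on-comma / strip / lower pipeline over intermediate substrings by a single character-level state machine per string (token buffer plus pending-whitespace run, comma flushes, whitespace buffered, other chars lowercased as appended), building no intermediate part lists.
import Mathlib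
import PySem

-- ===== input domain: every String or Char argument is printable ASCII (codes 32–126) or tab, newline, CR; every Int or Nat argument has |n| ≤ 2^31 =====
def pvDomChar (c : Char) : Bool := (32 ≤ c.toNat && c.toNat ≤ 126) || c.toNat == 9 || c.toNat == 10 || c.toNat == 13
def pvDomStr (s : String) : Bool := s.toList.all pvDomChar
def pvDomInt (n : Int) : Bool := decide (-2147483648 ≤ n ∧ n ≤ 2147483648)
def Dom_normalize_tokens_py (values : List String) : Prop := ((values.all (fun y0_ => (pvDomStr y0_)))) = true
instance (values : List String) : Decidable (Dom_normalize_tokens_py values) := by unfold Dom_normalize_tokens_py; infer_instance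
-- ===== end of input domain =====

-- B replaces A's split/strip/lower pipeline by a single character-level state machine
-- (token buffer + pending-whitespace run); proved to return exactly A's token list.


-- ===== PORT A =====
-- nested loops: split each value on ',', strip().lower() each part, append if non-empty
def normalize_tokens_py (values : List String) : List String :=
  values.foldl (fun tokens v =>
    (PySem.Chars.splitOn v.toList ",".toList).foldl (fun tokens part =>
      let token := PySem.Chars.lower (PySem.Chars.strip part)
      if token ≠ [] then tokens ++ [String.ofList token] else tokens) tokens) []

-- ===== PORT B =====
-- character-level state machine over each value: state = (tokens, buf, pending whitespace);
-- ',' flushes buf, whitespace goes to pending (only once buf is non-empty), any other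
-- character commits pending and appends its lowercase form; end of string flushes buf
def pvScanStep (st : List String × List Char × List Char) (ch : Char) :
    List String × List Char × List Char :=
  if ch = ',' then
    (if st.2.1 ≠ [] then st.1 ++ [String.ofList st.2.1] else st.1, [], [])
  else if PySem.Chars.isspace ch then
    (st.1, st.2.1, if st.2.1 ≠ [] then st.2.2 ++ [ch] else st.2.2)
  else
    (st.1, st.2.1 ++ st.2.2 ++ [PySem.Chars.lowerChar ch], [])

def normalize_tokens_py_alt (values : List String) : List String :=
  values.foldl (fun tokens v =>
    let st := v.toList.foldl pvScanStep (tokens, [], [])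
    if st.2.1 ≠ [] then st.1 ++ [String.ofList st.2.1] else st.1) []

-- ===== PRECONDITION & SPEC =====
def Spec_normalize_tokens_py (values : List String) (out : List String) : Prop := out = normalize_tokens_py_alt values
instance (values : List String) (out : List String) : Decidable (Spec_normalize_tokens_py values out) := by unfold Spec_normalize_tokens_py; infer_instance

-- ===== CLAIM (what is proved, stated in full; the proofs are below) =====
def Claim_equal_normalize_tokens_py : Prop := ∀ (values : List String), Dom_normalize_tokens_py values → Spec_normalize_tokens_py values (normalize_tokens_py values)

-- ===== LEMMAS AND PROOFS =====

-- simple structural model of splitting on a single character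
def mySplit (c : Char) : List Char → List (List Char)
  | [] => [[]]
  | x :: xs => if x = c then [] :: mySplit c xs else (mySplit c xs).modifyHead (x :: ·)

theorem mySplit_ne_nil (c : Char) (l : List Char) : mySplit c l ≠ [] := by
  induction l with
  | nil => simp [mySplit]
  | cons x xs ih =>
    simp only [mySplit]
    split_ifs
    · simp
    · cases h : mySplit c xs with
      | nil => exact absurd h ih
      | cons a t => simp [List.modifyHead]

theorem splitOn_go_eq (c : Char) (fuel : Nat) (l cur : List Char) (acc : List (List Char))
    (h : l.length ≤ fuel) :
    PySem.Chars.splitOn.go [c] fuel l cur acc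
      = acc.reverse ++ (mySplit c l).modifyHead (cur.reverse ++ ·) := by
  induction fuel generalizing l cur acc with
  | zero =>
    have : l = [] := List.eq_nil_of_length_eq_zero (Nat.le_zero.mp h)
    subst this
    simp [PySem.Chars.splitOn.go, mySplit]
  | succ n ih =>
    cases l with
    | nil => simp [PySem.Chars.splitOn.go, mySplit]
    | cons x xs =>
      simp only [PySem.Chars.splitOn.go]
      by_cases hx : x = c
      · subst hx
        have hpre : [x].isPrefixOf (x :: xs) = true := by simp [List.isPrefixOf]
        rw [if_pos hpre]
        have hdrop : List.drop ([x].length) (x :: xs) = xs := rfl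
        rw [hdrop, ih xs [] (cur.reverse :: acc)
          (by simp only [List.length_cons] at h; omega)]
        have hne := mySplit_ne_nil x xs
        cases hsp : mySplit x xs with
        | nil => exact absurd hsp hne
        | cons a t => simp [mySplit, hsp, List.modifyHead]
      · have hb : (c == x) = false := beq_false_of_ne (fun e => hx e.symm)
        have hpre : [c].isPrefixOf (x :: xs) = false := by
          simp [List.isPrefixOf, hb]
        rw [if_neg (by simp [hpre])]
        rw [ih xs (x :: cur) acc (by simp only [List.length_cons] at h; omega)]
        have hne := mySplit_ne_nil c xs
        cases hsp : mySplit c xs with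
        | nil => exact absurd hsp hne
        | cons a t => simp [mySplit, hx, hsp, List.modifyHead]

theorem splitOn_eq_mySplit (c : Char) (l : List Char) :
    PySem.Chars.splitOn l [c] = mySplit c l := by
  unfold PySem.Chars.splitOn
  rw [splitOn_go_eq c (l.length + 1) l [] [] (Nat.le_succ _)]
  cases mySplit c l <;> simp [List.modifyHead]

-- the token filter A applies to each raw part
def tokF (t : List Char) : Option String :=
  if PySem.Chars.lower (PySem.Chars.strip t) = [] then none
  else some (String.ofList (PySem.Chars.lower (PySem.Chars.strip t)))

theorem inner_foldl_eq (parts : List (List Char)) (tokens : List String) :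
    parts.foldl (fun tokens part =>
      let token := PySem.Chars.lower (PySem.Chars.strip part)
      if token ≠ [] then tokens ++ [String.ofList token] else tokens) tokens
    = tokens ++ parts.filterMap tokF := by
  induction parts generalizing tokens with
  | nil => simp
  | cons p ps ih =>
    simp only [List.foldl_cons]
    rw [ih]
    simp only [List.filterMap_cons, tokF]
    by_cases h : PySem.Chars.lower (PySem.Chars.strip p) = [] <;> simp [h]

theorem A_eq_flat (values : List String) :
    normalize_tokens_py values
      = values.flatMap (fun v => (mySplit ',' v.toList).filterMap tokF) := by
  unfold normalize_tokens_py
  have hsep : (",".toList) = [','] := rfl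
  have hfun : (fun (tokens : List String) (v : String) =>
      (PySem.Chars.splitOn v.toList ",".toList).foldl (fun tokens part =>
        let token := PySem.Chars.lower (PySem.Chars.strip part)
        if token ≠ [] then tokens ++ [String.ofList token] else tokens) tokens)
      = fun tokens v => tokens ++ (mySplit ',' v.toList).filterMap tokF := by
    funext tokens v
    rw [hsep, splitOn_eq_mySplit, inner_foldl_eq]
  rw [hfun, PySem.List.foldl_append_eq_flatMap]
  simp

-- ---------- B side: the streaming scanner ----------

-- pure model of the scanner's strip/lower stream on one comma-free segment
def hscan (buf pending : List Char) : List Char → List Char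
  | [] => buf
  | c :: cs =>
    if PySem.Chars.isspace c then
      if buf ≠ [] then hscan buf (pending ++ [c]) cs else hscan buf pending cs
    else hscan (buf ++ pending ++ [PySem.Chars.lowerChar c]) [] cs

def optTok (t : List Char) : List String :=
  if t ≠ [] then [String.ofList t] else []

theorem lowerChar_of_isspace (c : Char) (h : PySem.Chars.isspace c = true) :
    PySem.Chars.lowerChar c = c := by
  unfold PySem.Chars.lowerChar
  have hup : PySem.Chars.isupper c = false := by
    have h65 : ('A' ≤ c) ↔ 65 ≤ c.toNat := by
      rw [Char.le_def]; exact UInt32.le_iff_toNat_le.trans Iff.rfl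
    have h90 : (c ≤ 'Z') ↔ c.toNat ≤ 90 := by
      rw [Char.le_def]; exact UInt32.le_iff_toNat_le.trans Iff.rfl
    unfold PySem.Chars.isspace at h
    unfold PySem.Chars.isupper
    simp only [Bool.or_eq_true, Bool.and_eq_true, decide_eq_true_eq] at h
    simp only [Bool.and_eq_false_iff, decide_eq_false_iff_not, h65, h90]
    omega
  simp [hup]

theorem rstrip_all_ws (p : List Char) (h : p.all PySem.Chars.isspace) :
    PySem.Chars.rstrip p = [] := by
  unfold PySem.Chars.rstrip
  have : p.reverse.dropWhile PySem.Chars.isspace = [] := by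
    rw [List.dropWhile_eq_nil_iff]
    intro x hx
    exact (List.all_eq_true.mp h) x (List.mem_reverse.mp hx)
  simp [this]

theorem rstrip_append_cons (a : List Char) (c : Char) (cs : List Char)
    (hc : PySem.Chars.isspace c = false) :
    PySem.Chars.rstrip (a ++ c :: cs) = a ++ c :: PySem.Chars.rstrip cs := by
  unfold PySem.Chars.rstrip
  have : (a ++ c :: cs).reverse = cs.reverse ++ (c :: a.reverse) := by simp
  rw [this, List.dropWhile_append]
  by_cases h : (cs.reverse.dropWhile PySem.Chars.isspace).isEmpty = true
  · rw [if_pos h]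
    rw [List.isEmpty_iff] at h
    simp [hc, h]
  · rw [if_neg h]
    simp

theorem map_lowerChar_all_ws (p : List Char) (h : p.all PySem.Chars.isspace) :
    p.map PySem.Chars.lowerChar = p := by
  induction p with
  | nil => rfl
  | cons c cs ih =>
    simp only [List.all_cons, Bool.and_eq_true] at h
    simp [lowerChar_of_isspace c h.1, ih h.2]

-- once buf is non-empty, the scanner computes buf ++ lower (rstrip (pending ++ rest))
theorem hscan_rstrip (cs : List Char) : ∀ (buf pending : List Char),
    buf ≠ [] → pending.all PySem.Chars.isspace →
    hscan buf pending cs = buf ++ PySem.Chars.lower (PySem.Chars.rstrip (pending ++ cs)) := by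
  induction cs with
  | nil =>
    intro buf pending hb hp
    simp [hscan, rstrip_all_ws pending hp, PySem.Chars.lower]
  | cons c cs ih =>
    intro buf pending hb hp
    by_cases hc : PySem.Chars.isspace c = true
    · have hp' : (pending ++ [c]).all PySem.Chars.isspace := by
        simp only [List.all_append, Bool.and_eq_true] at *
        exact ⟨hp, by simp [hc]⟩
      simp only [hscan, hc, if_pos, hb, ne_eq, not_false_iff]
      rw [ih buf (pending ++ [c]) hb hp']
      simp
    · simp only [hscan, hc, if_neg, Bool.false_eq_true, not_false_iff]
      rw [ih (buf ++ pending ++ [PySem.Chars.lowerChar c]) [] (by simp) (by simp)]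
      rw [rstrip_append_cons pending c cs (by simpa using hc)]
      simp [PySem.Chars.lower, map_lowerChar_all_ws pending hp, List.append_assoc]

theorem lstrip_cons_ws (c : Char) (cs : List Char) (h : PySem.Chars.isspace c = true) :
    PySem.Chars.lstrip (c :: cs) = PySem.Chars.lstrip cs := by
  simp [PySem.Chars.lstrip, h]

theorem hscan_strip (p : List Char) :
    hscan [] [] p = PySem.Chars.lower (PySem.Chars.strip p) := by
  induction p with
  | nil => simp [hscan, PySem.Chars.strip, PySem.Chars.lstrip, PySem.Chars.rstrip, PySem.Chars.lower]
  | cons c cs ih =>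
    by_cases hc : PySem.Chars.isspace c = true
    · simp only [hscan, hc, if_pos, ne_eq, not_true_eq_false, if_false]
      rw [ih]
      simp only [PySem.Chars.strip]
      rw [lstrip_cons_ws c cs hc]
    · simp only [hscan, hc, Bool.false_eq_true, if_false]
      simp only [List.nil_append]
      rw [hscan_rstrip cs [PySem.Chars.lowerChar c] [] (by simp) (by simp)]
      have hl : PySem.Chars.lstrip (c :: cs) = c :: cs := by
        simp [PySem.Chars.lstrip, hc]
      rw [PySem.Chars.strip, hl,
        show (c :: cs) = ([] ++ c :: cs) from rfl,
        rstrip_append_cons [] c cs (by simpa using hc)]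
      simp [PySem.Chars.lower]

-- the scanner on one whole string, related to mySplit of that string
theorem scan_eq (l : List Char) : ∀ (tokens : List String) (buf pending : List Char),
    (let st := l.foldl pvScanStep (tokens, buf, pending)
     if st.2.1 ≠ [] then st.1 ++ [String.ofList st.2.1] else st.1)
      = tokens ++ optTok (hscan buf pending (mySplit ',' l).headI)
          ++ ((mySplit ',' l).tail).filterMap tokF := by
  induction l with
  | nil =>
    intro tokens buf pending
    simp only [List.foldl_nil, mySplit, List.headI, List.tail, List.filterMap_nil, List.append_nil]
    show (if buf ≠ [] then tokens ++ [String.ofList buf] else tokens) = tokens ++ optTok (hscan buf pending [])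
    by_cases h : buf = [] <;> simp [hscan, optTok, h]
  | cons x xs ih =>
    intro tokens buf pending
    by_cases hx : x = ','
    · subst hx
      have hstep : pvScanStep (tokens, buf, pending) ','
          = (if buf ≠ [] then tokens ++ [String.ofList buf] else tokens, [], []) := by
        simp [pvScanStep]
      rw [List.foldl_cons, hstep,
        ih (if buf ≠ [] then tokens ++ [String.ofList buf] else tokens) [] []]
      have hm : mySplit ',' (',' :: xs) = [] :: mySplit ',' xs := by simp [mySplit]
      rw [hm]
      simp only [List.headI, List.tail]
      cases hsp : mySplit ',' xs with
      | nil => exact absurd hsp (mySplit_ne_nil ',' xs)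
      | cons p ps =>
        have hb : hscan buf pending [] = buf := rfl
        have hfp : optTok (hscan [] [] p) ++ ps.filterMap tokF = (p :: ps).filterMap tokF := by
          rw [hscan_strip p]
          unfold tokF optTok
          by_cases h : PySem.Chars.lower (PySem.Chars.strip p) = [] <;> simp [h]
        rw [hb, ← hfp]
        by_cases h : buf = [] <;> simp [optTok, h]
    · have hne : (x = ',') = False := by simp [hx]
      have hm : mySplit ',' (x :: xs) = (mySplit ',' xs).modifyHead (x :: ·) := by
        simp [mySplit, hx]
      cases hsp : mySplit ',' xs with
      | nil => exact absurd hsp (mySplit_ne_nil ',' xs)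
      | cons p ps =>
        rw [hm, hsp]
        simp only [List.modifyHead, List.headI, List.tail]
        by_cases hc : PySem.Chars.isspace x = true
        · have hstep : pvScanStep (tokens, buf, pending) x
              = (tokens, buf, if buf ≠ [] then pending ++ [x] else pending) := by
            simp [pvScanStep, hx, hc]
          rw [List.foldl_cons, hstep,
            ih tokens buf (if buf ≠ [] then pending ++ [x] else pending), hsp]
          simp only [List.headI, List.tail]
          have : hscan buf pending (x :: p)
              = hscan buf (if buf ≠ [] then pending ++ [x] else pending) p := by
            by_cases h : buf = [] <;> simp [hscan, hc, h]
          rw [this]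
        · have hstep : pvScanStep (tokens, buf, pending) x
              = (tokens, buf ++ pending ++ [PySem.Chars.lowerChar x], []) := by
            simp [pvScanStep, hx, hc]
          rw [List.foldl_cons, hstep,
            ih tokens (buf ++ pending ++ [PySem.Chars.lowerChar x]) [], hsp]
          simp only [List.headI, List.tail]
          have : hscan buf pending (x :: p)
              = hscan (buf ++ pending ++ [PySem.Chars.lowerChar x]) [] p := by
            simp [hscan, hc]
          rw [this]

theorem B_eq_flat (values : List String) :
    normalize_tokens_py_alt values
      = values.flatMap (fun v => (mySplit ',' v.toList).filterMap tokF) := by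
  unfold normalize_tokens_py_alt
  have hfun : (fun (tokens : List String) (v : String) =>
      let st := v.toList.foldl pvScanStep (tokens, [], [])
      if st.2.1 ≠ [] then st.1 ++ [String.ofList st.2.1] else st.1)
      = fun tokens v => tokens ++ (mySplit ',' v.toList).filterMap tokF := by
    funext tokens v
    rw [scan_eq v.toList tokens [] []]
    cases hsp : mySplit ',' v.toList with
    | nil => exact absurd hsp (mySplit_ne_nil ',' v.toList)
    | cons p ps =>
      simp only [List.headI, List.tail, List.filterMap_cons]
      rw [hscan_strip p]
      unfold tokF optTok
      by_cases h : PySem.Chars.lower (PySem.Chars.strip p) = [] <;> simp [h]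
  rw [hfun, PySem.List.foldl_append_eq_flatMap]
  simp

-- ===== VERDICT (by name: the statement is the Claim_ definition above) =====
theorem normalize_tokens_py_spec : Claim_equal_normalize_tokens_py := by
  intro values _
  unfold Spec_normalize_tokens_py
  rw [A_eq_flat, B_eq_flat]
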